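-- pv_equiv track=rewrite | github.com/shixi2ng/Satellite_RS_process_module | ARCE/ARCE.py | adjent
-- ===== SOURCE A (Python) =====
-- def adjent(pix, list_pix):
--     pix = list(pix)
--     list_pix = [list(_) for _ in list_pix]
--     if pix in list_pix:
--         return False
--
--     for pix_ in list_pix:
--         if abs(pix_[0] - pix[0]) <= 1 and abs(pix_[1] - pix[1]) <= 1:
--             return True
--     return False
-- ===== SOURCE B (Python) =====
-- def adjent(pix, list_pix):
--     cells = {tuple(p) for p in list_pix}
--     if not cells:
--         return False
--     px = (pix[0], pix[1])
--     if px in cells: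
--         return False
--     x, y = px
--     for dx in (-1, 0, 1):
--         for dy in (-1, 0, 1):
--             if dx == 0 and dy == 0:
--                 continue
--             if (x + dx, y + dy) in cells:
--                 return True
--     return False
-- ===== Notes on version B (the rewrite author's own statement) =====
-- stated objective: alternative
-- what changed: Replaces A's per-element distance scan with a set of occupied cells probed at the fixed 8 neighbouring coordinates, so the check after building the set is a constant number of lookups instead of a scan.
import Mathlib
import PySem

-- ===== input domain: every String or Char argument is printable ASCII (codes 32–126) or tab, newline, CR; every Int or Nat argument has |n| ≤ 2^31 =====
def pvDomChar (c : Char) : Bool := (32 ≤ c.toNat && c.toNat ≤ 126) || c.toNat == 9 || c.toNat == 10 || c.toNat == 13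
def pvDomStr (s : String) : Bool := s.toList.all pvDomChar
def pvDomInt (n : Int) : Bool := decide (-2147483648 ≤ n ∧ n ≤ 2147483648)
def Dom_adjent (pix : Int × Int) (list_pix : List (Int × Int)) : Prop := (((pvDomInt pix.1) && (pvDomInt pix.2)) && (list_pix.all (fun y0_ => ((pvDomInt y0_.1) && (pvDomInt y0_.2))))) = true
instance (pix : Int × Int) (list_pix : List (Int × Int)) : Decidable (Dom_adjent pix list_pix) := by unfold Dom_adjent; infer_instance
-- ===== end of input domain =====

-- B replaces A's per-element distance scan with a set of occupied cells probed at the 8 neighbouring coordinates (a different, lookup-based decomposition).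

-- ===== PORT A =====
-- the 'for pix_ in list_pix' loop with early return
def adjentLoopA (pix : Int × Int) : List (Int × Int) → Bool
  | [] => false
  | p :: rest =>
      if (p.1 - pix.1).natAbs ≤ 1 ∧ (p.2 - pix.2).natAbs ≤ 1 then true
      else adjentLoopA pix rest

def adjent (pix : Int × Int) (list_pix : List (Int × Int)) : Bool :=
  if list_pix.contains pix then false
  else adjentLoopA pix list_pix

-- ===== PORT B =====
def adjent_alt (pix : Int × Int) (list_pix : List (Int × Int)) : Bool :=
  let cells : PySem.Set (Int × Int) := PySem.Set.ofList list_pix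
  if cells.isEmpty then false
  else if PySem.Set.contains cells pix then false
  else
    [(-1 : Int), 0, 1].any fun dx =>
      [(-1 : Int), 0, 1].any fun dy =>
        if dx = 0 ∧ dy = 0 then false
        else PySem.Set.contains cells (pix.1 + dx, pix.2 + dy)

-- ===== PRECONDITION & SPEC =====
def Spec_adjent (pix : Int × Int) (list_pix : List (Int × Int)) (out : Bool) : Prop := out = adjent_alt pix list_pix
instance (pix : Int × Int) (list_pix : List (Int × Int)) (out : Bool) : Decidable (Spec_adjent pix list_pix out) := by unfold Spec_adjent; infer_instance

-- ===== CLAIM (what is proved, stated in full; the proofs are below) =====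
def Claim_equal_adjent : Prop := ∀ (pix : Int × Int) (list_pix : List (Int × Int)), Dom_adjent pix list_pix → Spec_adjent pix list_pix (adjent pix list_pix)

-- ===== LEMMAS AND PROOFS =====

theorem adjentLoopA_eq_any (pix : Int × Int) (l : List (Int × Int)) :
    adjentLoopA pix l =
      l.any (fun p => decide ((p.1 - pix.1).natAbs ≤ 1 ∧ (p.2 - pix.2).natAbs ≤ 1)) := by
  induction l with
  | nil => rfl
  | cons p rest ih =>
      by_cases h : (p.1 - pix.1).natAbs ≤ 1 ∧ (p.2 - pix.2).natAbs ≤ 1 <;>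
        simp [adjentLoopA, ih, h]

theorem mem_ofList_pair (xs : List (Int × Int)) (x : Int × Int) :
    x ∈ PySem.Set.ofList xs ↔ x ∈ xs := PySem.Set.mem_ofList xs x

theorem ofList_isEmpty (xs : List (Int × Int)) :
    (PySem.Set.ofList xs).isEmpty = xs.isEmpty := by
  rcases xs with _ | ⟨a, rest⟩
  · rfl
  · have h : (PySem.Set.ofList (a :: rest)).isEmpty = false :=
      List.isEmpty_eq_false_iff_exists_mem.mpr
        ⟨a, (mem_ofList_pair _ a).mpr (List.mem_cons_self)⟩
    simp [h]

theorem adjent_eq_iff (pix : Int × Int) (l : List (Int × Int)) :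
    adjent pix l = true ↔
      pix ∉ l ∧ ∃ p ∈ l, (p.1 - pix.1).natAbs ≤ 1 ∧ (p.2 - pix.2).natAbs ≤ 1 := by
  unfold adjent
  by_cases h : pix ∈ l
  · simp [h]
  · simp [h, adjentLoopA_eq_any, List.any_eq_true]

theorem adjent_alt_eq_iff (pix : Int × Int) (l : List (Int × Int)) :
    adjent_alt pix l = true ↔
      l ≠ [] ∧ pix ∉ l ∧
        ∃ dx ∈ [(-1 : Int), 0, 1], ∃ dy ∈ [(-1 : Int), 0, 1],
          ¬(dx = 0 ∧ dy = 0) ∧ (pix.1 + dx, pix.2 + dy) ∈ l := by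
  unfold adjent_alt
  simp only [ofList_isEmpty, List.isEmpty_iff]
  by_cases hnil : l = []
  · simp [hnil]
  · simp only [hnil, if_false, PySem.Set.contains]
    by_cases hmem : pix ∈ l
    · simp [hmem, hnil]
    · simp only [List.contains_iff_mem, mem_ofList_pair, hmem, if_false,
        List.any_eq_true, ne_eq, hnil, not_false_iff, true_and]
      constructor
      · rintro ⟨dx, hdx, dy, hdy, h⟩
        by_cases h0 : dx = 0 ∧ dy = 0
        · simp [h0] at h
        · simp only [h0, if_false, List.contains_iff_mem, mem_ofList_pair] at h
          exact ⟨dx, hdx, dy, hdy, h0, h⟩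
      · rintro ⟨dx, hdx, dy, hdy, h0, hm⟩
        exact ⟨dx, hdx, dy, hdy, by
          simp [h0, hm]⟩

theorem adjent_eq_alt (pix : Int × Int) (l : List (Int × Int)) :
    adjent pix l = adjent_alt pix l := by
  rw [Bool.eq_iff_iff, adjent_eq_iff, adjent_alt_eq_iff]
  constructor
  · rintro ⟨hnm, p, hp, h1, h2⟩
    refine ⟨fun h => by simp [h] at hp, hnm, p.1 - pix.1, ?_, p.2 - pix.2, ?_, ?_, ?_⟩
    · simp only [List.mem_cons, List.not_mem_nil, or_false]; omega
    · simp only [List.mem_cons, List.not_mem_nil, or_false]; omega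
    · rintro ⟨e1, e2⟩
      apply hnm
      have heq : p = pix := by
        obtain ⟨px, py⟩ := p; obtain ⟨qx, qy⟩ := pix
        dsimp at e1 e2
        simp only [Prod.mk.injEq]
        omega
      rwa [heq] at hp
    · have heq : (pix.1 + (p.1 - pix.1), pix.2 + (p.2 - pix.2)) = p := by
        obtain ⟨px, py⟩ := p
        simp only [Prod.mk.injEq]
        constructor <;> omega
      rwa [heq]
  · rintro ⟨-, hnm, dx, hdx, dy, hdy, -, hm⟩
    simp only [List.mem_cons, List.not_mem_nil, or_false] at hdx hdy
    exact ⟨hnm, (pix.1 + dx, pix.2 + dy), hm, by dsimp; omega, by dsimp; omega⟩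

-- ===== VERDICT (by name: the statement is the Claim_ definition above) =====
theorem adjent_spec : Claim_equal_adjent := by
  intro pix list_pix _
  unfold Spec_adjent
  exact adjent_eq_alt pix list_pix
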